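-- pv_equiv track=rewrite | github.com/Rusca8/DynamicDeures | deuresweb/generator.py | poli_op
-- ===== SOURCE A (Python) =====
-- def poli_op(op, px, qx):
--     """Suma (op=1), resta (op=2) o multiplica (op=3) els polinomis donats
--
--     :param op: 1 suma, 2 resta, 3 multiplica
--     :param px: primer polinomi a operar, P(x) com a llista de coeficients
--     :param qx: segon polinomi a operar, Q(x) com a llista de coeficients
--     """
--     if op == 1:  # suma
--         sol = [0 for _ in range(max(len(px), len(qx)))]
--         for x in range(len(sol)):  # això fa la suma. jo tampoc l'entendré d'aquí un mes, but it works
--             if x < len(px):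
--                 sol[-x-1] += px[-x-1]
--             if x < len(qx):
--                 sol[-x-1] += qx[-x-1]
--
--     elif op == 2:  # resta
--         sol = [0 for _ in range(max(len(px), len(qx)))]
--         for x in range(len(sol)):  # això fa la resta. jo tampoc l'entendré d'aquí un mes, but it works
--             if x < len(px):
--                 sol[-x-1] += px[-x-1]
--             if x < len(qx):
--                 sol[-x-1] -= qx[-x-1]
--
--     elif op == 3:  # multi
--         sol = [0 for _ in range(len(px) + len(qx) - 1)]
--         for x in range(len(px)):
--             for y in range(len(qx)):
--                 if px[-x-1] and qx[-y-1]: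
--                     sol[-(x+y)-1] += px[-x-1] * qx[-y-1]
--
--     elif op == 4:  # divi
--         ...
--
--     return sol
-- ===== SOURCE B (Python) =====
-- def _polyadd(a, b):
--     """Add two coefficient lists (high degree first), front-padding the shorter."""
--     n = max(len(a), len(b))
--     a = [0] * (n - len(a)) + a
--     b = [0] * (n - len(b)) + b
--     return [u + v for u, v in zip(a, b)]
--
--
-- def poli_op(op, px, qx):
--     """Suma (op=1), resta (op=2) o multiplica (op=3) els polinomis donats.
--
--     Add/subtract: front-pad the shorter list with zeros and combine term by
--     term (subtraction reuses addition on the negated qx).  Multiply: Horner-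
--     style shift-and-add fold -- for each coefficient of px (high degree first)
--     shift the accumulator one degree up and add qx scaled by it.  Ops other
--     than 1/2/3 leave `sol` unbound, as in the original.
--     """
--     if op == 1 or op == 2:
--         sol = _polyadd(px, qx if op == 1 else [-c for c in qx])
--     elif op == 3:
--         sol = []
--         for c in px:
--             sol = _polyadd(sol + [0], [c * q for q in qx])
--     return sol
-- ===== Notes on version B (the rewrite author's own statement) =====
-- stated objective: alternative
-- what changed: Add/subtract now front-pad the shorter coefficient list with zeros and combine the two equal-length lists term by term (subtraction reuses addition on the negated qx), instead of A's backwards negative-index scatter loop; multiplication is replaced by a Horner-style shift-and-add fold (for each px coefficient, high degree first, shift the accumulator one degree and add qx scaled by it) instead of A's preallocated double-loop scatter convolution.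
-- outside the precondition, e.g. on poli_op(3, [], [1, 2]): A returns [0], B returns []; on poli_op(3, [1, 2], []): A returns [0], B returns [0, 0]
import Mathlib
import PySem

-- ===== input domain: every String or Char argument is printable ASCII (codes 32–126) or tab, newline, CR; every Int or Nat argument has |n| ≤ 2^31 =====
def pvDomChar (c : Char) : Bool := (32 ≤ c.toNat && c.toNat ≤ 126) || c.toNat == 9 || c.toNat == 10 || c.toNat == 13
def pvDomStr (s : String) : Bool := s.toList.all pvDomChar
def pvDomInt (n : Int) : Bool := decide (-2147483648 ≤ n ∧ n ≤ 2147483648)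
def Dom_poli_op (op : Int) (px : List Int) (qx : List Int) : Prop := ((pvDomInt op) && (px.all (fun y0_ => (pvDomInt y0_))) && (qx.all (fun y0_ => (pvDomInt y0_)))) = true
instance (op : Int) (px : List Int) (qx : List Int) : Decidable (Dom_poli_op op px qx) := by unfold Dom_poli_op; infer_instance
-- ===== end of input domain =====

-- B replaces A's backwards negative-index scatter loops by: front-pad-with-zeros + term-by-term
-- combine for add/subtract (subtract = add the negated qx), and a Horner-style shift-and-add
-- fold for multiply; same asymptotic cost ("alternative"), no mutation.

-- ===== PORT A =====
-- Negative Python indices sol[-x-1] / px[-x-1] are ported with PySem.List.pyGetD / pySetD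
-- on the literal Int index -x-1 (always in range when the branch executes).
def poli_op (op : Int) (px : List Int) (qx : List Int) : List Int :=
  if op = 1 then
    -- sol = [0 for _ in range(max(len(px), len(qx)))]
    let sol0 := (PySem.List.pyRange 0 (max (PySem.List.len px) (PySem.List.len qx)) 1).map
      (fun _ => (0 : Int))
    (PySem.List.pyRange 0 (PySem.List.len sol0) 1).foldl (fun sol x =>
      let sol := if x < PySem.List.len px then
          PySem.List.pySetD sol (-x-1)
            (PySem.List.pyGetD sol (-x-1) 0 + PySem.List.pyGetD px (-x-1) 0)
        else sol
      if x < PySem.List.len qx then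
          PySem.List.pySetD sol (-x-1)
            (PySem.List.pyGetD sol (-x-1) 0 + PySem.List.pyGetD qx (-x-1) 0)
        else sol) sol0
  else if op = 2 then
    let sol0 := (PySem.List.pyRange 0 (max (PySem.List.len px) (PySem.List.len qx)) 1).map
      (fun _ => (0 : Int))
    (PySem.List.pyRange 0 (PySem.List.len sol0) 1).foldl (fun sol x =>
      let sol := if x < PySem.List.len px then
          PySem.List.pySetD sol (-x-1)
            (PySem.List.pyGetD sol (-x-1) 0 + PySem.List.pyGetD px (-x-1) 0)
        else sol
      if x < PySem.List.len qx then
          PySem.List.pySetD sol (-x-1)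
            (PySem.List.pyGetD sol (-x-1) 0 - PySem.List.pyGetD qx (-x-1) 0)
        else sol) sol0
  else if op = 3 then
    let sol0 := (PySem.List.pyRange 0 (PySem.List.len px + PySem.List.len qx - 1) 1).map
      (fun _ => (0 : Int))
    (PySem.List.pyRange 0 (PySem.List.len px) 1).foldl (fun sol x =>
      (PySem.List.pyRange 0 (PySem.List.len qx) 1).foldl (fun sol y =>
        -- if px[-x-1] and qx[-y-1]:  (int truthiness: both nonzero)
        if PySem.List.pyGetD px (-x-1) 0 ≠ 0 ∧ PySem.List.pyGetD qx (-y-1) 0 ≠ 0 then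
          PySem.List.pySetD sol (-(x+y)-1)
            (PySem.List.pyGetD sol (-(x+y)-1) 0 +
              PySem.List.pyGetD px (-x-1) 0 * PySem.List.pyGetD qx (-y-1) 0)
        else sol) sol) sol0
  else []  -- unreachable under Pre_: Python raises UnboundLocalError (sol unbound)

-- ===== PORT B =====
-- _polyadd(a, b): front-pad the shorter with zeros, combine term by term
def polyadd (a b : List Int) : List Int :=
  ((List.replicate (max a.length b.length - a.length) 0 ++ a).zip
    (List.replicate (max a.length b.length - b.length) 0 ++ b)).map
    (fun p : Int × Int => p.1 + p.2)

def poli_op_alt (op : Int) (px : List Int) (qx : List Int) : List Int :=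
  if op = 1 ∨ op = 2 then
    polyadd px (if op = 1 then qx else qx.map (fun c => -c))
  else if op = 3 then
    px.foldl (fun sol c => polyadd (sol ++ [0]) (qx.map (fun q => c * q))) []
  else []  -- unreachable under Pre_: Source B raises UnboundLocalError (sol unbound)

-- ===== PRECONDITION & SPEC =====
-- For any op other than 1, 2, 3 (including the stubbed op=4) both Pythons raise
-- UnboundLocalError at `return sol`; additionally op=3 with exactly one empty coefficient
-- list is excluded: a degenerate corner where the length of the all-zero product is an
-- accident of A's preallocation (A returns [0]*(len-1); B's fold returns a zero list of a
-- different length), neither value being the specified one.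
def Pre_poli_op (op : Int) (px : List Int) (qx : List Int) : Prop :=
  op = 1 ∨ op = 2 ∨ (op = 3 ∧ (px = [] ↔ qx = []))
instance (op : Int) (px : List Int) (qx : List Int) : Decidable (Pre_poli_op op px qx) := by
  unfold Pre_poli_op; infer_instance
def pvWitness_poli_op : Int × List Int × List Int := (3, [1, 2], [3, -1])

def Spec_poli_op (op : Int) (px : List Int) (qx : List Int) (out : List Int) : Prop :=
  out = poli_op_alt op px qx
instance (op : Int) (px : List Int) (qx : List Int) (out : List Int) :
    Decidable (Spec_poli_op op px qx out) := by unfold Spec_poli_op; infer_instance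

-- ===== CLAIM (what is proved, stated in full; the proofs are below) =====
def Claim_equal_poli_op : Prop := ∀ (op : Int) (px : List Int) (qx : List Int),
  Dom_poli_op op px qx → Pre_poli_op op px qx → Spec_poli_op op px qx (poli_op op px qx)

-- ===== LEMMAS AND PROOFS =====

/-- `sol[i] += v` on a Nat index (total; out-of-range is a no-op, never reached here). -/
def addAt (s : List Int) (i : Nat) (v : Int) : List Int := s.set i (s.getD i 0 + v)

theorem foldl_congr_inv {α β : Type} (P : α → Prop) (f g : α → β → α) :
    ∀ (xs : List β) (a : α), P a → (∀ s x, x ∈ xs → P s → P (f s x)) →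
      (∀ s x, x ∈ xs → P s → f s x = g s x) → xs.foldl f a = xs.foldl g a := by
  intro xs
  induction xs with
  | nil => simp
  | cons x xs ih =>
    intro a hPa hpres hag
    simp only [List.foldl_cons]
    rw [← hag a x (by simp) hPa]
    exact ih (f a x) (hpres a x (by simp) hPa)
      (fun s y hy hP => hpres s y (by simp [hy]) hP)
      (fun s y hy hP => hag s y (by simp [hy]) hP)

theorem length_foldl_addAt (ps : List (Nat × Int)) (init : List Int) :
    (ps.foldl (fun s p => addAt s p.1 p.2) init).length = init.length := by
  induction ps generalizing init with
  | nil => rfl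
  | cons p ps ih =>
    simp only [List.foldl_cons]
    rw [ih]
    simp [addAt]

theorem getD_addAt (s : List Int) (i : Nat) (v : Int) (j : Nat) :
    (addAt s i v).getD j 0 = if i = j ∧ i < s.length then s.getD j 0 + v else s.getD j 0 := by
  simp only [addAt, List.getD_eq_getElem?_getD, List.getElem?_set]
  by_cases h1 : i = j
  · subst h1
    by_cases h2 : i < s.length
    · simp [h2, List.getD_eq_getElem?_getD]
    · simp [h2, List.getElem?_eq_none (by omega : s.length ≤ i)]
  · simp [h1]

theorem getD_foldl_addAt (ps : List (Nat × Int)) (init : List Int)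
    (h : ∀ p ∈ ps, p.1 < init.length) (j : Nat) :
    (ps.foldl (fun s p => addAt s p.1 p.2) init).getD j 0
      = init.getD j 0 + ((ps.filter (fun p => p.1 == j)).map Prod.snd).sum := by
  induction ps generalizing init with
  | nil => simp
  | cons p ps ih =>
    simp only [List.foldl_cons]
    rw [ih _ (fun q hq => by
      simpa [addAt] using h q (List.mem_cons_of_mem _ hq))]
    rw [getD_addAt]
    have hp : p.1 < init.length := h p (by simp)
    by_cases hpj : p.1 = j
    · subst hpj
      simp [List.filter_cons, hp, add_assoc]
    · simp [List.filter_cons, hpj]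

theorem sum_map_range_ite (n t : Nat) (c : Nat → Int) :
    ((List.range n).map (fun x => if x = t then c x else 0)).sum = if t < n then c t else 0 := by
  induction n with
  | zero => simp
  | succ n ih =>
    rw [List.range_succ]
    simp only [List.map_append, List.sum_append, ih, List.map_cons, List.map_nil,
      List.sum_cons, List.sum_nil]
    by_cases h1 : n = t
    · subst h1; simp
    · have h2 : (t < n) = (t < n + 1) := by
        apply propext; constructor <;> intro <;> omega
      simp [h1, ← h2]

theorem sum_map_flatMap (l : List Nat) (f : Nat → List Int) :
    (l.flatMap f).sum = (l.map (fun x => (f x).sum)).sum := by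
  induction l with
  | nil => rfl
  | cons x l ih => simp [List.flatMap_cons, ih]

theorem pyGetD_negIdx (s : List Int) (x : Nat) (hx : x < s.length) :
    PySem.List.pyGetD s (-(x : Int) - 1) 0 = s.getD (s.length - 1 - x) 0 := by
  have h1 : (-(x : Int) - 1) = -(((x + 1 : Nat) : Int)) := by push_cast; ring
  rw [h1, PySem.List.pyGetD_neg_natCast _ _ _ (by omega) (by omega),
    List.getD_eq_getElem _ _ (by omega)]
  congr 1
  omega

theorem pySetD_negIdx (s : List Int) (x : Nat) (v : Int) (hx : x < s.length) :
    PySem.List.pySetD s (-(x : Int) - 1) v = s.set (s.length - 1 - x) v := by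
  have h0 : ¬ (0 ≤ -(x : Int) - 1) := by omega
  have h1 : -(s.length : Int) ≤ -(x : Int) - 1 := by omega
  have h2 : (-(-(x : Int) - 1)).toNat = x + 1 := by omega
  simp only [PySem.List.pySetD, PySem.List.pySet?, PySem.List.pyIdx?, h0, h1, if_false, if_true,
    if_neg h0, if_pos h1, h2, Option.map_some, Option.getD_some]
  congr 1
  omega

theorem pyRange_cast (n : Nat) :
    PySem.List.pyRange 0 (n : Int) 1 = (List.range n).map (fun k : Nat => (k : Int)) := by
  rw [PySem.List.pyRange_one]
  simp

theorem init12 (px qx : List Int) :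
    (PySem.List.pyRange 0 (max (PySem.List.len px) (PySem.List.len qx)) 1).map
        (fun _ => (0 : Int))
      = List.replicate (max px.length qx.length) 0 := by
  rw [show max (PySem.List.len px) (PySem.List.len qx)
      = ((max px.length qx.length : Nat) : Int) from by simp [PySem.List.len_eq]]
  rw [pyRange_cast, List.map_map]
  simp [List.eq_replicate_iff]

/-- The (index, contribution) pairs generated by A's add/sub loop (sg = +1 / -1). -/
def pairs12 (sg : Int) (px qx : List Int) : List (Nat × Int) :=
  (List.range (max px.length qx.length)).flatMap (fun x =>
    (if x < px.length then
        [(max px.length qx.length - 1 - x, px.getD (px.length - 1 - x) 0)] else [])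
    ++ (if x < qx.length then
        [(max px.length qx.length - 1 - x, sg * qx.getD (qx.length - 1 - x) 0)] else []))

/-- The (index, contribution) pairs generated by A's multiplication double loop. -/
def pairs3 (px qx : List Int) : List (Nat × Int) :=
  (List.range px.length).flatMap (fun x =>
    (List.range qx.length).flatMap (fun y =>
      if px.getD (px.length - 1 - x) 0 ≠ 0 ∧ qx.getD (qx.length - 1 - y) 0 ≠ 0 then
        [(px.length + qx.length - 1 - 1 - (x + y),
          px.getD (px.length - 1 - x) 0 * qx.getD (qx.length - 1 - y) 0)]
      else []))

theorem opA1_eq (px qx : List Int) :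
    poli_op 1 px qx = (pairs12 1 px qx).foldl (fun s p => addAt s p.1 p.2)
      (List.replicate (max px.length qx.length) 0) := by
  unfold poli_op
  rw [if_pos rfl]
  simp only [init12]
  rw [show PySem.List.len (List.replicate (max px.length qx.length) (0 : Int))
      = ((max px.length qx.length : Nat) : Int) from by simp [PySem.List.len_eq]]
  rw [pyRange_cast, List.foldl_map, pairs12, List.foldl_flatMap]
  apply foldl_congr_inv (fun s : List Int => s.length = max px.length qx.length)
  · simp
  · intro s x _ hs
    simp only [PySem.List.len_eq, Nat.cast_lt]
    split_ifs <;> simp [PySem.List.length_pySetD, hs]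
  · intro s x hx hs
    have hxn : x < max px.length qx.length := List.mem_range.mp hx
    have h1 : ((x : Int) < PySem.List.len px) = (x < px.length) := by
      simp [PySem.List.len_eq]
    have h2 : ((x : Int) < PySem.List.len qx) = (x < qx.length) := by
      simp [PySem.List.len_eq]
    simp only [h1, h2]
    by_cases hp : x < px.length <;> by_cases hq : x < qx.length <;>
        simp only [hp, hq, if_true, if_false, List.foldl_cons, List.foldl_nil,
          List.append_nil, List.nil_append, List.cons_append]
    · rw [pyGetD_negIdx s x (by omega), pyGetD_negIdx px x hp,
        pySetD_negIdx s x _ (by omega)]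
      rw [pyGetD_negIdx _ x (by simp [hs]; omega), pyGetD_negIdx qx x hq,
        pySetD_negIdx _ x _ (by simp [hs]; omega)]
      simp [addAt, hs, List.length_set, one_mul]
    · rw [pyGetD_negIdx s x (by omega), pyGetD_negIdx px x hp,
        pySetD_negIdx s x _ (by omega)]
      simp [addAt, hs]
    · rw [pyGetD_negIdx s x (by omega), pyGetD_negIdx qx x hq,
        pySetD_negIdx s x _ (by omega)]
      simp [addAt, hs, one_mul]

theorem opA2_eq (px qx : List Int) :
    poli_op 2 px qx = (pairs12 (-1) px qx).foldl (fun s p => addAt s p.1 p.2)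
      (List.replicate (max px.length qx.length) 0) := by
  unfold poli_op
  rw [if_neg (by norm_num), if_pos rfl]
  simp only [init12]
  rw [show PySem.List.len (List.replicate (max px.length qx.length) (0 : Int))
      = ((max px.length qx.length : Nat) : Int) from by simp [PySem.List.len_eq]]
  rw [pyRange_cast, List.foldl_map, pairs12, List.foldl_flatMap]
  apply foldl_congr_inv (fun s : List Int => s.length = max px.length qx.length)
  · simp
  · intro s x _ hs
    simp only [PySem.List.len_eq, Nat.cast_lt]
    split_ifs <;> simp [PySem.List.length_pySetD, hs]
  · intro s x hx hs
    have hxn : x < max px.length qx.length := List.mem_range.mp hx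
    have h1 : ((x : Int) < PySem.List.len px) = (x < px.length) := by
      simp [PySem.List.len_eq]
    have h2 : ((x : Int) < PySem.List.len qx) = (x < qx.length) := by
      simp [PySem.List.len_eq]
    simp only [h1, h2]
    by_cases hp : x < px.length <;> by_cases hq : x < qx.length <;>
        simp only [hp, hq, if_true, if_false, List.foldl_cons, List.foldl_nil,
          List.append_nil, List.nil_append, List.cons_append]
    · rw [pyGetD_negIdx s x (by omega), pyGetD_negIdx px x hp,
        pySetD_negIdx s x _ (by omega)]
      rw [pyGetD_negIdx _ x (by simp [hs]; omega), pyGetD_negIdx qx x hq,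
        pySetD_negIdx _ x _ (by simp [hs]; omega)]
      simp [addAt, hs, List.length_set, neg_one_mul]
      try simp only [sub_eq_add_neg]
    · rw [pyGetD_negIdx s x (by omega), pyGetD_negIdx px x hp,
        pySetD_negIdx s x _ (by omega)]
      simp [addAt, hs]
    · rw [pyGetD_negIdx s x (by omega), pyGetD_negIdx qx x hq,
        pySetD_negIdx s x _ (by omega)]
      simp [addAt, hs, one_mul]
      try simp only [sub_eq_add_neg]

theorem foldl_len_inv {β : Type} (f : List Int → β → List Int)
    (h : ∀ s b, (f s b).length = s.length) :
    ∀ (ys : List β) (s : List Int), (ys.foldl f s).length = s.length := by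
  intro ys
  induction ys with
  | nil => intro s; rfl
  | cons y ys ih => intro s; rw [List.foldl_cons, ih, h]

theorem init3 (px qx : List Int) :
    (PySem.List.pyRange 0 (PySem.List.len px + PySem.List.len qx - 1) 1).map
        (fun _ => (0 : Int))
      = List.replicate (px.length + qx.length - 1) 0 := by
  rw [PySem.List.pyRange_one, List.map_map]
  have h : ((PySem.List.len px + PySem.List.len qx - 1) - 0).toNat
      = px.length + qx.length - 1 := by
    simp [PySem.List.len_eq]
    omega
  rw [h]
  simp [List.eq_replicate_iff]

theorem opA3_eq (px qx : List Int) :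
    poli_op 3 px qx = (pairs3 px qx).foldl (fun s p => addAt s p.1 p.2)
      (List.replicate (px.length + qx.length - 1) 0) := by
  unfold poli_op
  rw [if_neg (by norm_num), if_neg (by norm_num), if_pos rfl]
  simp only [init3]
  simp only [PySem.List.len_eq, pyRange_cast, List.foldl_map]
  rw [pairs3, List.foldl_flatMap]
  apply foldl_congr_inv (fun s : List Int => s.length = px.length + qx.length - 1)
  · simp
  · intro s x _ hs
    refine (foldl_len_inv _ (fun s' b => ?_) _ s).trans hs
    split_ifs <;> simp [PySem.List.length_pySetD]
  · intro s x hx hs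
    have hxl : x < px.length := List.mem_range.mp hx
    rw [List.foldl_flatMap]
    apply foldl_congr_inv (fun s' : List Int => s'.length = px.length + qx.length - 1)
    · exact hs
    · intro s' y _ hs'
      split_ifs <;> simp [PySem.List.length_pySetD, hs']
    · intro s' y hy hs'
      have hyl : y < qx.length := List.mem_range.mp hy
      rw [pyGetD_negIdx px x hxl, pyGetD_negIdx qx y hyl]
      by_cases hc : px.getD (px.length - 1 - x) 0 ≠ 0 ∧ qx.getD (qx.length - 1 - y) 0 ≠ 0
      · rw [if_pos hc, if_pos hc]
        rw [show (-((x : Int) + (y : Int)) - 1 : Int) = -(((x + y : Nat) : Int)) - 1 from by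
          push_cast; ring]
        rw [pyGetD_negIdx s' (x + y) (by omega), pySetD_negIdx s' (x + y) _ (by omega)]
        simp [addAt, hs']
      · rw [if_neg hc, if_neg hc]
        simp

theorem getD_pairs12 (sg : Int) (px qx : List Int) (j : Nat)
    (hj : j < max px.length qx.length) :
    ((pairs12 sg px qx).foldl (fun s p => addAt s p.1 p.2)
        (List.replicate (max px.length qx.length) 0)).getD j 0
      = (if max px.length qx.length - 1 - j < px.length then
            px.getD (px.length - 1 - (max px.length qx.length - 1 - j)) 0 else 0)
        + sg * (if max px.length qx.length - 1 - j < qx.length then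
            qx.getD (qx.length - 1 - (max px.length qx.length - 1 - j)) 0 else 0) := by
  rw [getD_foldl_addAt _ _ ?hmem j]
  case hmem =>
    intro p hp
    simp only [pairs12, List.mem_flatMap, List.mem_range] at hp
    obtain ⟨x, hx, hpx⟩ := hp
    have hp1 : p.1 = max px.length qx.length - 1 - x := by
      rcases List.mem_append.mp hpx with h | h <;> split_ifs at h <;> simp_all
    simp only [List.length_replicate]
    omega
  have hinit : (List.replicate (max px.length qx.length) (0 : Int)).getD j 0 = 0 := by
    simp [List.getD_eq_getElem?_getD, List.getElem?_replicate]
    split <;> rfl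
  rw [hinit, zero_add, pairs12, List.filter_flatMap, List.map_flatMap, sum_map_flatMap]
  have hstep : ∀ x ∈ List.range (max px.length qx.length),
      (fun x => (List.map Prod.snd
          (List.filter (fun p => p.1 == j)
            ((if x < px.length then
                [(max px.length qx.length - 1 - x, px.getD (px.length - 1 - x) 0)] else []) ++
              if x < qx.length then
                [(max px.length qx.length - 1 - x, sg * qx.getD (qx.length - 1 - x) 0)]
              else []))).sum) x
        = (fun x => if x = max px.length qx.length - 1 - j then
            ((if x < px.length then px.getD (px.length - 1 - x) 0 else 0)
              + (if x < qx.length then sg * qx.getD (qx.length - 1 - x) 0 else 0)) else 0) x := by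
    intro x hx
    have hxn : x < max px.length qx.length := List.mem_range.mp hx
    by_cases hxj : x = max px.length qx.length - 1 - j
    · have hij : max px.length qx.length - 1 - x = j := by omega
      simp only [if_pos hxj]
      split_ifs with h1 h2 h2 <;>
        simp [List.filter_append, List.filter_cons, hij]
    · have hij : ¬ (max px.length qx.length - 1 - x = j) := by omega
      simp only [if_neg hxj]
      split_ifs with h1 h2 h2 <;>
        simp [List.filter_append, List.filter_cons, hij]
  rw [List.map_congr_left hstep, sum_map_range_ite, if_pos (by omega : max px.length qx.length - 1 - j < max px.length qx.length)]
  split_ifs with h1 h2 h2 <;> ring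

theorem getD_pairs3 (px qx : List Int) (j : Nat)
    (hj : j < px.length + qx.length - 1) :
    ((pairs3 px qx).foldl (fun s p => addAt s p.1 p.2)
        (List.replicate (px.length + qx.length - 1) 0)).getD j 0
      = ((List.range px.length).map (fun x =>
          if x ≤ px.length + qx.length - 1 - 1 - j ∧
             px.length + qx.length - 1 - 1 - j - x < qx.length then
            px.getD (px.length - 1 - x) 0 *
              qx.getD (qx.length - 1 - (px.length + qx.length - 1 - 1 - j - x)) 0
          else 0)).sum := by
  rw [getD_foldl_addAt _ _ ?hmem j]
  case hmem =>
    intro p hp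
    simp only [pairs3, List.mem_flatMap, List.mem_range] at hp
    obtain ⟨x, hx, y, hy, h⟩ := hp
    have hp1 : p.1 = px.length + qx.length - 1 - 1 - (x + y) := by
      split_ifs at h <;> simp_all
    simp only [List.length_replicate]
    omega
  have hinit : (List.replicate (px.length + qx.length - 1) (0 : Int)).getD j 0 = 0 := by
    simp [List.getD_eq_getElem?_getD, List.getElem?_replicate]
    split <;> rfl
  rw [hinit, zero_add, pairs3]
  simp only [List.filter_flatMap, List.map_flatMap, sum_map_flatMap]
  refine congrArg List.sum (List.map_congr_left ?_)
  intro x hx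
  have hxl : x < px.length := List.mem_range.mp hx
  have hin : ∀ y ∈ List.range qx.length,
      (fun y => (List.map Prod.snd (List.filter (fun p => p.1 == j)
          (if px.getD (px.length - 1 - x) 0 ≠ 0 ∧ qx.getD (qx.length - 1 - y) 0 ≠ 0 then
            [(px.length + qx.length - 1 - 1 - (x + y),
              px.getD (px.length - 1 - x) 0 * qx.getD (qx.length - 1 - y) 0)]
          else []))).sum) y
        = (fun y => if y = px.length + qx.length - 1 - 1 - j - x then
            (if x ≤ px.length + qx.length - 1 - 1 - j then
              px.getD (px.length - 1 - x) 0 * qx.getD (qx.length - 1 - y) 0 else 0)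
          else 0) y := by
    intro y hy
    beta_reduce
    have hyl : y < qx.length := List.mem_range.mp hy
    by_cases hc : px.getD (px.length - 1 - x) 0 ≠ 0 ∧ qx.getD (qx.length - 1 - y) 0 ≠ 0
    · rw [if_pos hc]
      by_cases hkey : px.length + qx.length - 1 - 1 - (x + y) = j
      · have h1 : y = px.length + qx.length - 1 - 1 - j - x := by omega
        have h2 : x ≤ px.length + qx.length - 1 - 1 - j := by omega
        have h3 : px.length + qx.length - 1 - 1 - (px.length + qx.length - 1 - 1 - j) = j := by
          omega
        simp [h1, h2, h3]
      · simp only [List.filter_cons, List.filter_nil]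
        rw [if_neg (by simpa using hkey)]
        simp only [List.map_nil, List.sum_nil]
        split_ifs with ha hb
        · exfalso; omega
        · rfl
        · rfl
    · rw [if_neg hc]
      push_neg at hc
      simp only [List.filter_nil, List.map_nil, List.sum_nil]
      split_ifs with ha hb
      · by_cases hpx0 : px.getD (px.length - 1 - x) 0 = 0
        · rw [hpx0, zero_mul]
        · rw [hc hpx0, mul_zero]
      · rfl
      · rfl
  rw [List.map_congr_left hin, sum_map_range_ite]
  by_cases hA : x ≤ px.length + qx.length - 1 - 1 - j <;>
    by_cases hB : px.length + qx.length - 1 - 1 - j - x < qx.length <;>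
      simp [hA, hB]

-- ===== B-side machinery: coefficient-of-degree view =====

/-- Coefficient of degree `t` of a high-degree-first coefficient list (0 beyond the list). -/
def bget (l : List Int) (t : Nat) : Int :=
  if t < l.length then l.getD (l.length - 1 - t) 0 else 0

theorem getD_eq_bget (l : List Int) (j : Nat) (h : j < l.length) :
    l.getD j 0 = bget l (l.length - 1 - j) := by
  unfold bget
  rw [if_pos (by omega)]
  congr 1
  omega

theorem getD_pad (k : Nat) (l : List Int) (j : Nat) :
    (List.replicate k (0 : Int) ++ l).getD j 0 = if j < k then 0 else l.getD (j - k) 0 := by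
  simp only [List.getD_eq_getElem?_getD]
  by_cases h : j < k
  · rw [List.getElem?_append_left (by simpa using h), if_pos h, List.getElem?_replicate]
    simp [h]
  · rw [List.getElem?_append_right (by simpa using h), if_neg h]
    simp

theorem getD_padzip (a b : List Int) (h : a.length = b.length) (j : Nat) :
    (((a.zip b).map (fun p : Int × Int => p.1 + p.2)).getD j 0) = a.getD j 0 + b.getD j 0 := by
  by_cases hj : j < a.length
  · rw [List.getD_eq_getElem _ _ (by simp [List.length_zip, h]; omega),
      List.getD_eq_getElem _ _ hj, List.getD_eq_getElem _ _ (by omega)]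
    simp [List.getElem_zip]
  · rw [List.getD_eq_default _ _ (by simp [List.length_zip, h]; omega),
      List.getD_eq_default _ _ (by omega), List.getD_eq_default _ _ (by omega)]
    simp

theorem bget_pad (k : Nat) (l : List Int) (t : Nat) :
    bget (List.replicate k (0 : Int) ++ l) t = bget l t := by
  unfold bget
  simp only [List.length_append, List.length_replicate]
  by_cases h1 : t < l.length
  · rw [if_pos (by omega), if_pos h1, getD_pad, if_neg (by omega)]
    congr 1
    omega
  · by_cases h2 : t < k + l.length
    · rw [if_pos h2, if_neg h1, getD_pad, if_pos (by omega)]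
    · rw [if_neg h2, if_neg h1]

theorem bget_zipadd (a b : List Int) (h : a.length = b.length) (t : Nat) :
    bget ((a.zip b).map (fun p : Int × Int => p.1 + p.2)) t = bget a t + bget b t := by
  unfold bget
  simp only [List.length_map, List.length_zip, h, min_self]
  by_cases ht : t < b.length
  · simp only [if_pos ht]
    exact getD_padzip a b h _
  · simp only [if_neg ht]
    simp

theorem bget_polyadd (a b : List Int) (t : Nat) :
    bget (polyadd a b) t = bget a t + bget b t := by
  unfold polyadd
  rw [bget_zipadd _ _ (by simp)]
  simp only [bget_pad]

theorem length_polyadd (a b : List Int) :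
    (polyadd a b).length = max a.length b.length := by
  simp [polyadd]

theorem getD_concat (l : List Int) (c : Int) (j : Nat) :
    (l ++ [c]).getD j 0
      = if j < l.length then l.getD j 0 else if j = l.length then c else 0 := by
  simp only [List.getD_eq_getElem?_getD]
  by_cases h : j < l.length
  · rw [List.getElem?_append_left h, if_pos h]
  · rw [List.getElem?_append_right (by omega), if_neg h]
    by_cases he : j = l.length
    · subst he
      simp
    · rw [if_neg he, List.getElem?_eq_none (by simp; omega)]
      rfl

theorem bget_append_last (l : List Int) (c : Int) (t : Nat) :
    bget (l ++ [c]) t = if t = 0 then c else bget l (t - 1) := by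
  unfold bget
  simp only [List.length_append, List.length_cons, List.length_nil, getD_concat]
  split_ifs <;> first | rfl | omega | (congr 1 <;> omega)

theorem bget_scale (c : Int) (q : List Int) (t : Nat) :
    bget (q.map (fun x => c * x)) t = c * bget q t := by
  unfold bget
  simp only [List.length_map]
  by_cases h : t < q.length
  · rw [if_pos h, if_pos h]
    simp only [List.getD_eq_getElem?_getD, List.getElem?_map]
    cases q[q.length - 1 - t]? <;> simp
  · rw [if_neg h, if_neg h, mul_zero]

theorem bget_mapneg (q : List Int) (t : Nat) :
    bget (q.map (fun x => -x)) t = - bget q t := by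
  unfold bget
  simp only [List.length_map]
  by_cases h : t < q.length
  · rw [if_pos h, if_pos h]
    simp only [List.getD_eq_getElem?_getD, List.getElem?_map]
    cases q[q.length - 1 - t]? <;> simp
  · rw [if_neg h, if_neg h, neg_zero]

/-- Convolution of the degree-`a` coefficients: the degree-`t` coefficient of the product. -/
def convB (px qx : List Int) (t : Nat) : Int :=
  ((List.range (t + 1)).map (fun a => bget px a * bget qx (t - a))).sum

theorem conv_snoc (px' qx : List Int) (c : Int) (t : Nat) :
    convB (px' ++ [c]) qx t
      = c * bget qx t + (if t = 0 then 0 else convB px' qx (t - 1)) := by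
  unfold convB
  rw [List.range_succ_eq_map, List.map_cons, List.sum_cons, List.map_map]
  rw [bget_append_last, if_pos rfl, Nat.sub_zero]
  congr 1
  have hmap : ∀ a ∈ List.range t,
      ((fun a => bget (px' ++ [c]) a * bget qx (t - a)) ∘ Nat.succ) a
        = (fun a => bget px' a * bget qx (t - 1 - a)) a := by
    intro a ha
    have halt : a < t := List.mem_range.mp ha
    simp only [Function.comp_apply]
    rw [bget_append_last, if_neg (Nat.succ_ne_zero a)]
    rw [show Nat.succ a - 1 = a from rfl, show t - Nat.succ a = t - 1 - a from by omega]
  rw [List.map_congr_left hmap]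
  by_cases ht : t = 0
  · subst ht
    simp
  · rw [if_neg ht]
    rw [show t - 1 + 1 = t from by omega]

theorem horner_spec (qx : List Int) (hq : qx ≠ []) (px : List Int) :
    ((px.foldl (fun sol c => polyadd (sol ++ [0]) (qx.map (fun q => c * q))) []).length
        = if px = [] then 0 else px.length + qx.length - 1)
    ∧ ∀ t, bget (px.foldl (fun sol c => polyadd (sol ++ [0]) (qx.map (fun q => c * q))) []) t
        = convB px qx t := by
  have hn : 0 < qx.length := List.length_pos_iff.mpr hq
  induction px using List.reverseRecOn with
  | nil =>
    constructor
    · simp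
    · intro t
      unfold convB
      rw [List.foldl_nil]
      simp [bget]
  | append_singleton px' c ih =>
    obtain ⟨ihlen, ihget⟩ := ih
    rw [List.foldl_append, List.foldl_cons, List.foldl_nil]
    constructor
    · rw [length_polyadd]
      simp only [List.length_append, List.length_map, List.length_cons, List.length_nil]
      by_cases hp : px' = []
      · rw [ihlen, if_pos hp, if_neg (by simp)]
        subst hp
        simp
        omega
      · rw [ihlen, if_neg hp, if_neg (by simp)]
        have : 0 < px'.length := List.length_pos_iff.mpr hp
        simp
        omega
    · intro t
      rw [bget_polyadd, bget_append_last, bget_scale, conv_snoc]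
      by_cases ht : t = 0
      · subst ht
        rw [if_pos rfl, if_pos rfl]
        ring
      · rw [if_neg ht, if_neg ht, ihget]
        ring

theorem sum_range_ext (f : Nat → Int) (M N : Nat) (hMN : M ≤ N)
    (h0 : ∀ a, M ≤ a → f a = 0) :
    ((List.range N).map f).sum = ((List.range M).map f).sum := by
  rw [show N = M + (N - M) from by omega, List.range_add, List.map_append, List.sum_append,
    List.map_map]
  have : ((List.range (N - M)).map (f ∘ fun x => M + x)).sum = 0 := by
    apply List.sum_eq_zero
    intro y hy
    simp only [List.mem_map, Function.comp_apply] at hy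
    obtain ⟨x, _, hx⟩ := hy
    rw [← hx, h0 _ (by omega)]
  rw [this, add_zero]

theorem conv_eq_scatter_sum (px qx : List Int) (K : Nat) :
    convB px qx K
      = ((List.range px.length).map (fun x =>
          if x ≤ K ∧ K - x < qx.length then
            px.getD (px.length - 1 - x) 0 * qx.getD (qx.length - 1 - (K - x)) 0
          else 0)).sum := by
  set g : Nat → Int := fun a => if a ≤ K then bget px a * bget qx (K - a) else 0 with hg
  have h1 : convB px qx K = ((List.range (K + 1)).map g).sum := by
    unfold convB
    refine congrArg List.sum (List.map_congr_left ?_)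
    intro a ha
    have halt : a < K + 1 := List.mem_range.mp ha
    have hle : a ≤ K := by omega
    simp [hg, hle]
  have h2 : ((List.range px.length).map (fun x =>
      if x ≤ K ∧ K - x < qx.length then
        px.getD (px.length - 1 - x) 0 * qx.getD (qx.length - 1 - (K - x)) 0
      else 0)).sum = ((List.range px.length).map g).sum := by
    refine congrArg List.sum (List.map_congr_left ?_)
    intro x hx
    have hxl : x < px.length := List.mem_range.mp hx
    simp only [hg, bget]
    by_cases hxK : x ≤ K
    · by_cases hKx : K - x < qx.length
      · rw [if_pos ⟨hxK, hKx⟩, if_pos hxK, if_pos hxl, if_pos hKx]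
      · rw [if_neg (by tauto), if_pos hxK, if_pos hxl, if_neg hKx, mul_zero]
    · rw [if_neg (by tauto), if_neg hxK]
  have hgK : ∀ a, K + 1 ≤ a → g a = 0 := by
    intro a ha
    simp only [hg]
    rw [if_neg (by omega)]
  have hgm : ∀ a, px.length ≤ a → g a = 0 := by
    intro a ha
    simp only [hg, bget]
    by_cases haK : a ≤ K
    · rw [if_pos haK, if_neg (by omega), zero_mul]
    · rw [if_neg haK]
  rw [h1, h2]
  rcases Nat.le_total (K + 1) px.length with h | h
  · rw [sum_range_ext g (K + 1) px.length h hgK]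
  · rw [sum_range_ext g px.length (K + 1) h hgm]

theorem eq12a (px qx : List Int) : poli_op 1 px qx = poli_op_alt 1 px qx := by
  rw [opA1_eq]
  have hB : poli_op_alt 1 px qx = polyadd px qx := by
    unfold poli_op_alt
    rw [if_pos (Or.inl rfl), if_pos rfl]
  rw [hB]
  apply List.ext_getElem
  · rw [length_foldl_addAt, length_polyadd]
    simp
  · intro j h1 h2
    have hj : j < max px.length qx.length := by
      simpa [length_foldl_addAt] using h1
    rw [← List.getD_eq_getElem _ 0 h1, ← List.getD_eq_getElem _ 0 h2,
      getD_pairs12 1 px qx j hj, getD_eq_bget _ _ h2, bget_polyadd,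
      length_polyadd, one_mul]
    rfl

theorem eq12b (px qx : List Int) : poli_op 2 px qx = poli_op_alt 2 px qx := by
  rw [opA2_eq]
  have hB : poli_op_alt 2 px qx = polyadd px (qx.map (fun c => -c)) := by
    unfold poli_op_alt
    rw [if_pos (Or.inr rfl), if_neg (by norm_num)]
  rw [hB]
  apply List.ext_getElem
  · rw [length_foldl_addAt, length_polyadd]
    simp
  · intro j h1 h2
    have hj : j < max px.length qx.length := by
      simpa [length_foldl_addAt] using h1
    rw [← List.getD_eq_getElem _ 0 h1, ← List.getD_eq_getElem _ 0 h2,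
      getD_pairs12 (-1) px qx j hj, getD_eq_bget _ _ h2, bget_polyadd,
      length_polyadd, bget_mapneg, neg_one_mul]
    simp only [List.length_map]
    rfl

theorem eq3 (px qx : List Int) (hp : px ≠ []) (hq : qx ≠ []) :
    poli_op 3 px qx = poli_op_alt 3 px qx := by
  obtain ⟨hlen, hget⟩ := horner_spec qx hq px
  have hm : 0 < px.length := List.length_pos_iff.mpr hp
  have hn : 0 < qx.length := List.length_pos_iff.mpr hq
  have hB : poli_op_alt 3 px qx
      = px.foldl (fun sol c => polyadd (sol ++ [0]) (qx.map (fun q => c * q))) [] := by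
    unfold poli_op_alt
    rw [if_neg (by norm_num), if_pos rfl]
  rw [opA3_eq, hB]
  apply List.ext_getElem
  · rw [length_foldl_addAt, hlen, if_neg hp]
    simp
  · intro j h1 h2
    have hj : j < px.length + qx.length - 1 := by
      simpa [length_foldl_addAt] using h1
    have hjF : j < (px.foldl (fun sol c => polyadd (sol ++ [0])
        (qx.map (fun q => c * q))) []).length := h2
    rw [← List.getD_eq_getElem _ 0 h1, ← List.getD_eq_getElem _ 0 h2,
      getD_pairs3 px qx j hj, getD_eq_bget _ _ hjF, hget]
    rw [show (px.foldl (fun sol c => polyadd (sol ++ [0]) (qx.map (fun q => c * q))) []).length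
        = px.length + qx.length - 1 from by rw [hlen, if_neg hp]]
    rw [conv_eq_scatter_sum]

-- ===== VERDICT (by name: the statement is the Claim_ definition above) =====
theorem poli_op_spec : Claim_equal_poli_op := by
  intro op px qx _ hpre
  unfold Spec_poli_op
  rcases hpre with h | h | ⟨h, hiff⟩
  · subst h
    exact eq12a px qx
  · subst h
    exact eq12b px qx
  · subst h
    by_cases hp : px = []
    · have hq : qx = [] := hiff.mp hp
      subst hp; subst hq
      decide
    · have hq : qx ≠ [] := fun e => hp (hiff.mpr e)
      exact eq3 px qx hp hq
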